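-- pv_equiv track=rewrite | github.com/renzoscholman/IOT-Seminar | ecg/ecg.py | get_hr_time
-- ===== SOURCE A (Python) =====
-- def get_hr_time(data):
--     time = 0
--     i = 0
--     time_data = []
--     add_time = 0
--     while i < len(data):
--         if data[i]:
--             if time:
--                 time_data.append(time + add_time)
--                 time = 0
--                 add_time = 0
--             else:
--                 add_time += 1
--         else:
--             time += 1
--         i += 1
--     return time_data
-- ===== SOURCE B (Python) =====
-- def get_hr_time(data):
--     res = []
--     prev = -1
--     for i in range(1, len(data)):
--         if data[i] and not data[i - 1]:
--             res.append(i - prev - 1)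
--             prev = i
--     return res
-- ===== Notes on version B (the rewrite author's own statement) =====
-- stated objective: simpler
-- what changed: Replaces A's two running counters (time, add_time) with rising-edge detection: whenever data[i] is truthy and data[i-1] falsy, append the index difference to the previous edge; one comparison per element instead of counter bookkeeping.
import Mathlib
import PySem

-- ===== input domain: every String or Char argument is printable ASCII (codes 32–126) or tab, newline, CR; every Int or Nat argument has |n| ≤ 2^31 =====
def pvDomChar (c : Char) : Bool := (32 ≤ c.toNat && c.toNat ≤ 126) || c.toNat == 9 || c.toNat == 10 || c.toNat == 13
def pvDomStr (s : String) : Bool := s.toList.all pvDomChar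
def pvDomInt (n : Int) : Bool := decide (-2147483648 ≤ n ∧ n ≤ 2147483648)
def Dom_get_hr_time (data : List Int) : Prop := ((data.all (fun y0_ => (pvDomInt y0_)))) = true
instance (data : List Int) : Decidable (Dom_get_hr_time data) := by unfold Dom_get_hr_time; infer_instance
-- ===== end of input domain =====

-- B replaces A's two running counters with rising-edge detection and index differences (simpler).


-- ===== PORT A =====
-- A's while loop over i, state (time, add_time, time_data), as structural recursion over the list
def getHrA : List Int → Int → Int → List Int → List Int
  | [], _, _, acc => acc
  | d :: rest, time, add_time, acc =>
    if d ≠ 0 then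
      if time ≠ 0 then getHrA rest 0 0 (acc ++ [time + add_time])
      else getHrA rest time (add_time + 1) acc
    else getHrA rest (time + 1) add_time acc

def get_hr_time (data : List Int) : List Int := getHrA data 0 0 []

-- ===== PORT B =====
-- B's for-loop over i in range(1, len(data)) reading data[i] and data[i-1]:
-- traversal carrying the previous element pd, the index i, the last edge index prev
def getHrB : List Int → Int → Int → Int → List Int → List Int
  | [], _, _, _, acc => acc
  | d :: rest, pd, i, prev, acc =>
    if d ≠ 0 ∧ pd = 0 then getHrB rest d (i + 1) i (acc ++ [i - prev - 1])
    else getHrB rest d (i + 1) prev acc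

def get_hr_time_alt (data : List Int) : List Int :=
  match data with
  | [] => []
  | d0 :: rest => getHrB rest d0 1 (-1) []

-- ===== PRECONDITION & SPEC =====
def Spec_get_hr_time (data : List Int) (out : List Int) : Prop := out = get_hr_time_alt data
instance (data : List Int) (out : List Int) : Decidable (Spec_get_hr_time data out) := by unfold Spec_get_hr_time; infer_instance

-- ===== CLAIM (what is proved, stated in full; the proofs are below) =====
def Claim_equal_get_hr_time : Prop := ∀ (data : List Int), Dom_get_hr_time data → Spec_get_hr_time data (get_hr_time data)

-- ===== LEMMAS AND PROOFS =====
-- Invariant: time + add_time = i - prev - 1; the last element d was zero iff time ≠ 0.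
theorem getHrB_eq_getHrA (rest : List Int) : ∀ (d i prev time add : Int) (acc : List Int),
    0 ≤ time → time + add = i - prev - 1 → (d = 0 → time ≠ 0) → (d ≠ 0 → time = 0) →
    getHrB rest d i prev acc = getHrA rest time add acc := by
  induction rest with
  | nil => intros; rfl
  | cons e rest ih =>
    intro d i prev time add acc htn hsum h0 h1
    by_cases he : e = 0
    · -- e = 0: B skips, A increments time
      simp only [getHrB, getHrA, he]
      simp only [ne_eq, not_true_eq_false, false_and, if_false]
      exact ih 0 (i + 1) prev (time + 1) add acc (by omega) (by omega) (fun _ => by omega) (fun h => absurd rfl h)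
    · by_cases hd : d = 0
      · -- rising edge: both append, values equal
        have ht : time ≠ 0 := h0 hd
        simp only [getHrB, getHrA]
        rw [if_pos ⟨he, hd⟩, if_pos he, if_pos ht]
        have : time + add = i - prev - 1 := hsum
        rw [this]
        exact ih e (i + 1) i 0 0 (acc ++ [i - prev - 1]) le_rfl (by omega)
          (fun h => absurd h he) (fun _ => rfl)
      · -- d ≠ 0, e ≠ 0: inside a truthy run
        have ht : time = 0 := h1 hd
        simp only [getHrB, getHrA]
        rw [if_neg (by simp [hd]), if_pos he, if_neg (by simp [ht])]
        exact ih e (i + 1) prev time (add + 1) acc htn (by omega)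
          (fun h => absurd h he) (fun _ => ht)

theorem get_hr_time_spec : Claim_equal_get_hr_time := by
  intro data _
  show get_hr_time data = get_hr_time_alt data
  cases data with
  | nil => rfl
  | cons d0 rest =>
    simp only [get_hr_time, get_hr_time_alt, getHrA]
    by_cases hd : d0 = 0
    · rw [if_neg (by simp [hd])]
      exact (getHrB_eq_getHrA rest d0 1 (-1) 1 0 [] (by omega) (by omega)
        (fun _ => by omega) (fun h => absurd hd h)).symm
    · rw [if_pos hd, if_neg (by simp)]
      exact (getHrB_eq_getHrA rest d0 1 (-1) 0 1 [] le_rfl (by omega)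
        (fun h => absurd h hd) (fun _ => rfl)).symm
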